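-- pv_equiv track=rewrite | github.com/shine-tong/PathDataVisual | scripts/animate_six_axis.py | get_flag_ranges
-- ===== SOURCE A (Python) =====
-- def get_flag_ranges(flags):
--     ranges = []
--     if not flags:
--         return ranges
--
--     start = 0
--     current = flags[0]
--     for i, flag in enumerate(flags[1:], start=1):
--         if flag != current:
--             ranges.append((current, start, i - 1))
--             start = i
--             current = flag
--     ranges.append((current, start, len(flags) - 1))
--     return ranges
-- ===== SOURCE B (Python) =====
-- def get_flag_ranges(flags):
--     ranges = []
--     n = len(flags)
--     start = 0
--     while start < n:
--         end = start + 1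
--         while end < n and flags[end] == flags[start]:
--             end += 1
--         ranges.append((flags[start], start, end - 1))
--         start = end
--     return ranges
-- ===== Notes on version B (the rewrite author's own statement) =====
-- stated objective: alternative
-- what changed: B extracts whole runs recursively (scan each maximal equal prefix, emit its range, recurse on the remainder) instead of A's single pass that tracks current/start and detects transitions.
import Mathlib
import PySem

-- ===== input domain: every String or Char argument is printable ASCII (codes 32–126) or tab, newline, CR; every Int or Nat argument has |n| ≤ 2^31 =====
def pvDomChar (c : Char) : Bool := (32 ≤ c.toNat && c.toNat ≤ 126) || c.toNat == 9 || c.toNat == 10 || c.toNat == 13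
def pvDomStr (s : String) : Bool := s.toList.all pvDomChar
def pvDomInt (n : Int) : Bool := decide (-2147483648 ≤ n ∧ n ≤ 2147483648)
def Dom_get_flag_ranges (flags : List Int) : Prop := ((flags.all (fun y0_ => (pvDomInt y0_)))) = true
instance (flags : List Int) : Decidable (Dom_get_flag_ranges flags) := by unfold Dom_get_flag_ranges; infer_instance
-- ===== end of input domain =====

-- B groups the list into maximal runs of equal values recursively, instead of
-- A's transition-detecting single pass with current/start bookkeeping (objective: alternative).

-- ===== PORT A =====
-- state: (ranges, start, current); loop over enumerate(flags[1:], start=1)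
def get_flag_ranges (flags : List Int) : List (Int × Int × Int) :=
  match flags with
  | [] => []
  | f0 :: rest =>
    let st := (PySem.List.enumerate rest 1).foldl
      (fun (s : List (Int × Int × Int) × Int × Int) (p : Int × Int) =>
        if p.2 ≠ s.2.2 then (s.1 ++ [(s.2.2, s.2.1, p.1 - 1)], p.1, p.2)
        else s) ([], 0, f0)
    st.1 ++ [(st.2.2, st.2.1, (flags.length : Int) - 1)]

-- ===== PORT B =====
-- inner while: advance end while flags[end] == flags[start]
def altRun (flags : List Int) (v : Int) (e : Nat) : Nat :=
  if h : e < flags.length then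
    if flags[e] == v then altRun flags v (e + 1) else e
  else e
termination_by flags.length - e

-- outer while: emit one run per iteration, then continue from end
def altGo (flags : List Int) (start : Nat) : List (Int × Int × Int) :=
  if h : start < flags.length then
    (flags[start], (start : Int), ((altRun flags flags[start] (start + 1) : Int) - 1)) ::
      altGo flags (altRun flags flags[start] (start + 1))
  else []
termination_by flags.length - start
decreasing_by
  have : start + 1 ≤ altRun flags flags[start] (start + 1) := by
    generalize flags[start] = v
    generalize start + 1 = e
    fun_induction altRun flags v e with
    | case1 => omega
    | case2 => omega
    | case3 => omega
  omega

def get_flag_ranges_alt (flags : List Int) : List (Int × Int × Int) :=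
  altGo flags 0

-- ===== PRECONDITION & SPEC =====
def Spec_get_flag_ranges (flags : List Int) (out : List (Int × Int × Int)) : Prop := out = get_flag_ranges_alt flags
instance (flags : List Int) (out : List (Int × Int × Int)) : Decidable (Spec_get_flag_ranges flags out) := by unfold Spec_get_flag_ranges; infer_instance

-- ===== CLAIM (what is proved, stated in full; the proofs are below) =====
def Claim_equal_get_flag_ranges : Prop := ∀ (flags : List Int), Dom_get_flag_ranges flags → Spec_get_flag_ranges flags (get_flag_ranges flags)

-- ===== LEMMAS AND PROOFS =====

-- the loop body of port A, named for the proofs (definitionally the inline lambda of the port)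
def pvStep (s : List (Int × Int × Int) × Int × Int) (p : Int × Int) :
    List (Int × Int × Int) × Int × Int :=
  if p.2 ≠ s.2.2 then (s.1 ++ [(s.2.2, s.2.1, p.1 - 1)], p.1, p.2) else s

-- list-based run recursion: the shape pv_loop relates port A to; bridged to altGo afterwards
def pvGo (xs : List Int) (start : Int) : List (Int × Int × Int) :=
  match xs with
  | [] => []
  | v :: rest =>
    let k : Int := (rest.takeWhile (fun y => y == v)).length + 1
    (v, start, start + k - 1) :: pvGo (rest.dropWhile (fun y => y == v)) (start + k)
termination_by xs.length
decreasing_by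
  simp only [List.length_cons]
  exact Nat.lt_succ_of_le (List.length_dropWhile_le _ rest)

lemma pvGo_cons (v : Int) (rest : List Int) (s : Int) :
    pvGo (v :: rest) s
      = (v, s, s + ((rest.takeWhile (fun y => y == v)).length : Int)) ::
        pvGo (rest.dropWhile (fun y => y == v))
          (s + ((rest.takeWhile (fun y => y == v)).length : Int) + 1) := by
  simp only [pvGo]
  generalize ((rest.takeWhile (fun y => y == v)).length : Int) = k
  rw [show s + (k + 1) - 1 = s + k by ring, show s + (k + 1) = s + k + 1 by ring]

-- pvG xs start p: like pvGo, but the first emitted range ends at p + (equal-prefix length of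
-- the tail); p is the absolute index of the head element (p = start gives altGo).
def pvG (xs : List Int) (start p : Int) : List (Int × Int × Int) :=
  match xs with
  | [] => []
  | v :: rest =>
    let k : Int := ((rest.takeWhile (fun y => y == v)).length : Int)
    (v, start, p + k) :: pvGo (rest.dropWhile (fun y => y == v)) (p + k + 1)

lemma pvG_self (xs : List Int) (s : Int) : pvG xs s s = pvGo xs s := by
  cases xs with
  | nil => simp [pvG, pvGo]
  | cons v rest => rw [pvGo_cons]; rfl

-- the A-loop invariant: folding pvStep over the enumerated tail and appending the trailing
-- range equals the accumulated output plus pvG of the remaining run structure.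
lemma pv_loop (rest : List Int) (i : Int) (acc : List (Int × Int × Int)) (start current : Int) :
    ((PySem.List.enumerate rest i).foldl pvStep (acc, start, current)).1 ++
      [(((PySem.List.enumerate rest i).foldl pvStep (acc, start, current)).2.2,
        ((PySem.List.enumerate rest i).foldl pvStep (acc, start, current)).2.1,
        i + (rest.length : Int) - 1)]
      = acc ++ pvG (current :: rest) start (i - 1) := by
  induction rest generalizing i acc start current with
  | nil =>
    simp [PySem.List.enumerate_nil, pvG, pvGo]
  | cons x xs ih =>
    rw [PySem.List.enumerate_cons]
    by_cases hx : x = current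
    · subst hx
      simp only [List.foldl_cons]
      rw [show pvStep (acc, start, x) (i, x) = (acc, start, x) by
            simp [pvStep]]
      have h := ih (i + 1) acc start x
      rw [show i + ((x :: xs).length : Int) - 1 = (i + 1) + (xs.length : Int) - 1 by
            push_cast [List.length_cons]; ring]
      rw [h]
      have hBe : (x == x) = true := by simp
      simp only [pvG, List.takeWhile, List.dropWhile, hBe, List.length_cons]
      push_cast
      ring_nf
    · simp only [List.foldl_cons]
      rw [show pvStep (acc, start, current) (i, x) = (acc ++ [(current, start, i - 1)], i, x) by
            simp [pvStep, hx]]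
      have h := ih (i + 1) (acc ++ [(current, start, i - 1)]) i x
      rw [show i + ((x :: xs).length : Int) - 1 = (i + 1) + (xs.length : Int) - 1 by
            push_cast [List.length_cons]; ring]
      rw [h]
      have hBe : (x == current) = false := by simpa using hx
      simp only [pvG, List.takeWhile, List.dropWhile, hBe, List.length_nil,
        List.append_assoc, List.singleton_append, Int.natCast_zero, add_zero]
      rw [show i - 1 + 1 = i by ring, pvGo_cons]
      ring_nf


lemma pv_drop_length_takeWhile (p : Int → Bool) (xs : List Int) :
    xs.drop (xs.takeWhile p).length = xs.dropWhile p := by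
  induction xs with
  | nil => simp
  | cons x xs ih =>
    by_cases hp : p x
    · simp [hp, ih]
    · simp [hp]

lemma pvAltRun_eq (flags : List Int) (v : Int) (e : Nat) :
    altRun flags v e = e + ((flags.drop e).takeWhile (fun y => y == v)).length := by
  fun_induction altRun flags v e with
  | case1 e h hv ih =>
    rw [ih, List.drop_eq_getElem_cons h, List.takeWhile_cons, hv]
    simp; omega
  | case2 e h hv =>
    simp only [Bool.not_eq_true] at hv
    rw [List.drop_eq_getElem_cons h, List.takeWhile_cons, hv]
    simp
  | case3 e h =>
    rw [List.drop_eq_nil_of_le (by omega)]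
    simp

lemma pvAltGo_eq (flags : List Int) (start : Nat) :
    altGo flags start = pvGo (flags.drop start) (start : Int) := by
  fun_induction altGo flags start with
  | case1 start h ih =>
    rw [List.drop_eq_getElem_cons h, pvGo_cons, ih, pvAltRun_eq]
    have hd : flags.drop (start + 1 + ((flags.drop (start + 1)).takeWhile
        (fun y => y == flags[start])).length)
        = (flags.drop (start + 1)).dropWhile (fun y => y == flags[start]) := by
      conv_rhs => rw [← pv_drop_length_takeWhile]
      rw [List.drop_drop]
    rw [hd]
    push_cast
    ring_nf

  | case2 start h =>
    rw [List.drop_eq_nil_of_le (by omega)]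
    simp [pvGo]

-- ===== VERDICT (by name: the statement is the Claim_ definition above) =====
theorem get_flag_ranges_spec : Claim_equal_get_flag_ranges := by
  intro flags _
  unfold Spec_get_flag_ranges
  cases flags with
  | nil => simp [get_flag_ranges, get_flag_ranges_alt, altGo]

  | cons f0 rest =>
    have h := pv_loop rest 1 [] 0 f0
    have e : get_flag_ranges (f0 :: rest)
        = ((PySem.List.enumerate rest 1).foldl pvStep ([], 0, f0)).1 ++
          [(((PySem.List.enumerate rest 1).foldl pvStep ([], 0, f0)).2.2,
            ((PySem.List.enumerate rest 1).foldl pvStep ([], 0, f0)).2.1,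
            ((f0 :: rest).length : Int) - 1)] := rfl
    rw [e, show (((f0 :: rest).length : Int) - 1) = 1 + (rest.length : Int) - 1 by
          push_cast [List.length_cons]; ring]
    rw [h, show (1 : Int) - 1 = 0 by ring, pvG_self]
    simp [get_flag_ranges_alt, pvAltGo_eq]
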